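-- pv_equiv track=rewrite | github.com/mengjihua/Binary-Battle | 贪心与思维/贪心/从最小or最大开始贪心/3462.py | maxSum1
-- ===== SOURCE A (Python) =====
-- from typing import List
--
-- def maxSum1(grid: List[List[int]], limits: List[int], k: int) -> int:
--     dic = [(i, x) for i, row in enumerate(grid) for x in row]
--     dic.sort(key=lambda x: x[1], reverse=True)
--
--     ans = 0
--     for row, x in dic:
--         if k == 0:
--             break
--         if limits[row] > 0:
--             limits[row] -= 1
--             k -= 1
--             ans += x
--     return ans
-- ===== SOURCE B (Python) =====
-- from typing import List
--
-- def maxSum1(grid: List[List[int]], limits: List[int], k: int) -> int: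
--     # Keep only the top-`limit` values of each row (a larger value outside that
--     # prefix can never be picked), then take the k largest of the survivors.
--     vals = []
--     for row, limit in zip(grid, limits):
--         if limit > 0:
--             vals.extend(sorted(row, reverse=True)[:limit])
--     vals.sort(reverse=True)
--     return sum(vals[:k])
-- ===== Notes on version B (the rewrite author's own statement) =====
-- stated objective: faster
-- what changed: A flattens the whole grid into (row, value) pairs, sorts all of them descending and greedily scans with mutable per-row counters; B never builds the pair list: it keeps only each row's top-limit values, pools those survivors, and sums the k largest of the pool (it sorts plain ints row by row and sorts only the pruned pool, with no row bookkeeping during selection, and does not mutate limits).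
-- outside the precondition, e.g. on maxSum1([[1, 2]], [2], -1): A returns 3, B returns 2; on maxSum1([[5], [1]], [1], 1): A returns 5, B returns 5
import Mathlib
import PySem

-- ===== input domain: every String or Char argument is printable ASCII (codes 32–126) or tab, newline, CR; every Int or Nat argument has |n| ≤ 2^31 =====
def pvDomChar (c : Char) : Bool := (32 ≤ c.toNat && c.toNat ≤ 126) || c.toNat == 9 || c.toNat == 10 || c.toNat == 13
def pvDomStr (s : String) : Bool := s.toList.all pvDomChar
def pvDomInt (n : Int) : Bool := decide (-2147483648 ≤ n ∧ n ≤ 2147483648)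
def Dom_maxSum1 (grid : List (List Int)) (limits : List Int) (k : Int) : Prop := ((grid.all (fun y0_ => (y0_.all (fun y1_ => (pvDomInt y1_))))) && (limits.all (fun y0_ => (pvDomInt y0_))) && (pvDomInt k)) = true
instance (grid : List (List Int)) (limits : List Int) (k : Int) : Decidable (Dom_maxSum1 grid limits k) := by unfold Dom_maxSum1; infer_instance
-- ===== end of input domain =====

-- B keeps only each row's top-`limit` values and then the k largest survivors (equal RETURN value;
-- Python A also mutates `limits` in place, B does not).

-- ===== PORT A =====
-- the for-loop over the sorted pair list, with its `break` as an early return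
def pvLoopA : List (Int × Int) → List Int → Int → Int → Int
  | [], _, _, ans => ans
  | (row, x) :: rest, limits, k, ans =>
    if k = 0 then ans
    else if PySem.List.pyGetD limits row 0 > 0 then
      pvLoopA rest (PySem.List.pySetD limits row (PySem.List.pyGetD limits row 0 - 1)) (k - 1) (ans + x)
    else pvLoopA rest limits k ans

def maxSum1 (grid : List (List Int)) (limits : List Int) (k : Int) : Int :=
  let dic := (PySem.List.enumerate grid).flatMap (fun p => p.2.map (fun x => (p.1, x)))
  let dic' := PySem.List.sorted dic (fun q => q.2) true
  pvLoopA dic' limits k 0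

-- ===== PORT B =====
def maxSum1_alt (grid : List (List Int)) (limits : List Int) (k : Int) : Int :=
  let vals := (grid.zip limits).foldl
    (fun acc p =>
      if p.2 > 0 then acc ++ PySem.List.slice (PySem.List.sorted p.1 (fun x => x) true) none (some p.2)
      else acc) []
  let vals' := PySem.List.sorted vals (fun x => x) true
  (PySem.List.slice vals' none (some k)).sum

-- ===== PRECONDITION & SPEC =====
-- Pre_ excludes (a) negative k, outside the problem's domain, where A's `k == 0` stop never fires
-- (it takes everything limits allow) while B's negative slice drops trailing candidates — both
-- accidents of the implementations — and (b) unless k = 0, grids with a nonempty row past the end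
-- of `limits`, where A's `limits[row]` raises IndexError except on lucky orderings in which the
-- budget runs out before the scan reaches such a row.
def Pre_maxSum1 (grid : List (List Int)) (limits : List Int) (k : Int) : Prop :=
  0 ≤ k ∧ (k = 0 ∨ ∀ row ∈ grid.drop limits.length, row = [])
instance (grid : List (List Int)) (limits : List Int) (k : Int) : Decidable (Pre_maxSum1 grid limits k) := by unfold Pre_maxSum1; infer_instance

def pvWitness_maxSum1 : List (List Int) × List Int × Int := ([[1, 2], [3]], [1, 2], 2)

def Spec_maxSum1 (grid : List (List Int)) (limits : List Int) (k : Int) (out : Int) : Prop := out = maxSum1_alt grid limits k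
instance (grid : List (List Int)) (limits : List Int) (k : Int) (out : Int) : Decidable (Spec_maxSum1 grid limits k out) := by unfold Spec_maxSum1; infer_instance

-- ===== CLAIM (what is proved, stated in full; the proofs are below) =====
def Claim_equal_maxSum1 : Prop := ∀ (grid : List (List Int)) (limits : List Int) (k : Int), Dom_maxSum1 grid limits k → Pre_maxSum1 grid limits k → Spec_maxSum1 grid limits k (maxSum1 grid limits k)

-- ===== LEMMAS AND PROOFS =====

-- the subsequence of pairs A's loop would pick with NO budget k (rows still capped by `limits`)
def pvF : List (Int × Int) → List Int → List (Int × Int)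
  | [], _ => []
  | (row, x) :: rest, limits =>
    if PySem.List.pyGetD limits row 0 > 0 then
      (row, x) :: pvF rest (PySem.List.pySetD limits row (PySem.List.pyGetD limits row 0 - 1))
    else pvF rest limits

-- A's loop sums the first k values of that subsequence
lemma pvLoopA_eq (S : List (Int × Int)) : ∀ (L : List Int) (k ans : Int), 0 ≤ k →
    pvLoopA S L k ans = ans + (((pvF S L).map (·.2)).take k.toNat).sum := by
  induction S with
  | nil => intro L k ans hk; simp [pvLoopA, pvF]
  | cons hd tl ih =>
    obtain ⟨row, x⟩ := hd
    intro L k ans hk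
    by_cases hk0 : k = 0
    · simp [pvLoopA, hk0]
    · have hkpos : 0 < k := lt_of_le_of_ne hk (Ne.symm hk0)
      by_cases hg : PySem.List.pyGetD L row 0 > 0
      · have hks : k.toNat = (k - 1).toNat + 1 := by omega
        simp only [pvLoopA, pvF, if_neg hk0, if_pos hg]
        rw [ih _ _ _ (by omega), hks]
        simp [List.take_succ_cons]
        ring
      · simp only [pvLoopA, pvF, if_neg hk0, if_neg hg]
        exact ih _ _ _ hk

lemma pvF_sublist (S : List (Int × Int)) : ∀ L, (pvF S L).Sublist S := by
  induction S with
  | nil => intro L; simp [pvF]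
  | cons hd tl ih =>
    obtain ⟨row, x⟩ := hd
    intro L
    by_cases hg : PySem.List.pyGetD L row 0 > 0
    · simpa [pvF, if_pos hg] using List.Sublist.cons₂ (row, x) (ih _)
    · simpa [pvF, if_neg hg] using (ih L).trans (List.sublist_cons_self (row, x) tl)

lemma pvF_filter (i : Nat) (S : List (Int × Int)) : ∀ (L : List Int),
    (∀ p ∈ S, 0 ≤ p.1) →
    ((pvF S L).filter (fun p => p.1 = (i : Int))).map (·.2)
      = (((S.filter (fun p => p.1 = (i : Int))).map (·.2)).take (L.getD i 0).toNat) := by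
  induction S with
  | nil => intro L h; simp [pvF]
  | cons hd tl ih =>
    obtain ⟨row, x⟩ := hd
    intro L h
    have hrow0 : 0 ≤ row := h _ List.mem_cons_self
    obtain ⟨rn, rfl⟩ : ∃ m : Nat, row = (m : Int) := ⟨row.toNat, (Int.toNat_of_nonneg hrow0).symm⟩
    have htl : ∀ p ∈ tl, 0 ≤ p.1 := fun p hp => h p (List.mem_cons_of_mem _ hp)
    by_cases hg : PySem.List.pyGetD L (rn : Int) 0 > 0
    · have hg' : L.getD rn 0 > 0 := by rwa [PySem.List.pyGetD_natCast] at hg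
      have hrowlen : rn < L.length := by
        by_contra hc
        rw [List.getD_eq_default _ _ (by omega)] at hg'
        omega
      by_cases hri : rn = i
      · subst hri
        have hks : (L.getD rn 0).toNat = (L.getD rn 0 - 1).toNat + 1 := by omega
        simp only [pvF]; rw [if_pos hg]
        simp only [PySem.List.pySetD_natCast, PySem.List.pyGetD_natCast]
        rw [List.filter_cons_of_pos (by simp), List.filter_cons_of_pos (by simp)]
        simp only [List.map_cons, hks, List.take_succ_cons]
        rw [ih _ htl]
        congr 2
        simp [List.getD, hrowlen]
      · simp only [pvF]; rw [if_pos hg]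
        simp only [PySem.List.pySetD_natCast, PySem.List.pyGetD_natCast]
        have hne : ¬ ((rn : Int) = (i : Int)) := by exact_mod_cast hri
        rw [List.filter_cons_of_neg (by simpa using hne), List.filter_cons_of_neg (by simpa using hne)]
        rw [ih _ htl]
        congr 2
        simp [List.getD, hri]
    · have hg' : ¬ (L.getD rn 0 > 0) := by rwa [PySem.List.pyGetD_natCast] at hg
      simp only [pvF]; rw [if_neg hg]
      by_cases hri : rn = i
      · subst hri
        have : (L.getD rn 0).toNat = 0 := by omega
        rw [List.filter_cons_of_pos (by simp), this]
        simp only [List.map_cons, List.take_zero]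
        rw [ih _ htl, this, List.take_zero]
      · have hne : ¬ ((rn : Int) = (i : Int)) := by exact_mod_cast hri
        rw [List.filter_cons_of_neg (by simpa using hne)]
        exact ih _ htl

lemma pvPartition (n : Nat) : ∀ (l : List (Int × Int)), (∀ p ∈ l, 0 ≤ p.1 ∧ p.1 < (n : Int)) →
    l.Perm ((List.range n).flatMap (fun (i : Nat) => l.filter (fun p => p.1 = (i : Int)))) := by
  induction n with
  | zero =>
    intro l h
    have : l = [] := by
      cases l with
      | nil => rfl
      | cons a t => exact absurd (h a List.mem_cons_self) (by rintro ⟨h1, h2⟩; push_cast at h2; omega)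
    simp [this]
  | succ n ih =>
    intro l h
    have h1 : l.Perm (l.filter (fun p => !decide (p.1 = (n : Int))) ++ l.filter (fun p => decide (p.1 = (n : Int)))) :=
      ((List.filter_append_perm _ l).symm).trans List.perm_append_comm
    have hbound : ∀ p ∈ l.filter (fun p => !decide (p.1 = (n : Int))), 0 ≤ p.1 ∧ p.1 < (n : Int) := by
      intro p hp
      rw [List.mem_filter] at hp
      obtain ⟨hl, hne⟩ := hp
      have := h p hl
      simp at hne
      push_cast at this ⊢
      omega
    have h2 := ih _ hbound
    have hfe : ∀ i ∈ List.range n,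
        (l.filter (fun p => !decide (p.1 = (n : Int)))).filter (fun p => p.1 = (i : Int))
          = l.filter (fun p => p.1 = (i : Int)) := by
      intro i hi
      rw [List.mem_range] at hi
      rw [List.filter_filter]
      apply List.filter_congr
      intro p hp
      by_cases hpi : p.1 = (i : Int)
      · have : ¬ p.1 = (n : Int) := by rw [hpi]; exact_mod_cast Nat.ne_of_lt hi
        simp [hpi]; omega
      · simp [hpi]
    have h3 : ((List.range n).flatMap (fun (i : Nat) => (l.filter (fun p => !decide (p.1 = (n : Int)))).filter (fun p => p.1 = (i : Int))))
        = (List.range n).flatMap (fun (i : Nat) => l.filter (fun p => p.1 = (i : Int))) := by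
      unfold List.flatMap
      congr 1
      exact List.map_congr_left hfe
    rw [h3] at h2
    have h4 : ((List.range n).flatMap (fun (i : Nat) => l.filter (fun p => p.1 = (i : Int)))) ++ l.filter (fun p => decide (p.1 = (n : Int)))
        = (List.range (n+1)).flatMap (fun (i : Nat) => l.filter (fun p => p.1 = (i : Int))) := by
      rw [List.range_succ, List.flatMap_append, List.flatMap_singleton]
    exact h1.trans (h4 ▸ h2.append_right _)

lemma pvDic_fst (xs : List (List Int)) (s : Int)
    (p : Int × Int) (hp : p ∈ (PySem.List.enumerate xs s).flatMap (fun q => q.2.map (fun x => (q.1, x)))) :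
    s ≤ p.1 ∧ p.1 < s + xs.length := by
  rw [List.mem_flatMap] at hp
  obtain ⟨q, hq, hpq⟩ := hp
  rw [PySem.List.mem_enumerate_iff] at hq
  obtain ⟨kk, hk, rfl⟩ := hq
  rw [List.mem_map] at hpq
  obtain ⟨x, hx, rfl⟩ := hpq
  refine ⟨by simp, by simp; omega⟩

lemma pvFilterDic (xs : List (List Int)) : ∀ (s i : Int), s ≤ i →
    ((PySem.List.enumerate xs s).flatMap (fun q => q.2.map (fun x => (q.1, x)))).filter (fun p => p.1 = i)
      = (xs.getD (i - s).toNat []).map (fun x => (i, x)) := by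
  induction xs with
  | nil => intro s i h; simp [PySem.List.enumerate]
  | cons r rs ih =>
    intro s i h
    rw [PySem.List.enumerate_cons]
    simp only [List.flatMap_cons, List.filter_append]
    by_cases his : i = s
    · subst his
      have h1 : (r.map (fun x => ((i : Int), x))).filter (fun p => p.1 = i) = r.map (fun x => (i, x)) := by
        rw [List.filter_eq_self]
        intro p hp
        rw [List.mem_map] at hp
        obtain ⟨x, hx, rfl⟩ := hp
        simp
      have h2 : ((PySem.List.enumerate rs (i+1)).flatMap (fun q => q.2.map (fun x => (q.1, x)))).filter (fun p => p.1 = i) = [] := by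
        rw [List.filter_eq_nil_iff]
        intro p hp
        have := pvDic_fst rs (i+1) p hp
        simp
        omega
      rw [h1, h2]
      simp
    · have h1 : (r.map (fun x => (s, x))).filter (fun p => p.1 = i) = [] := by
        rw [List.filter_eq_nil_iff]
        intro p hp
        rw [List.mem_map] at hp
        obtain ⟨x, hx, rfl⟩ := hp
        simpa using fun hc => his hc.symm
      rw [h1, List.nil_append, ih (s+1) i (by omega)]
      have : (i - s).toNat = (i - (s+1)).toNat + 1 := by omega
      rw [this]
      simp

-- two descending lists that are permutations of each other are equal
lemma pvEqOfPermDesc (l₁ l₂ : List Int) (hp : l₁.Perm l₂)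
    (h₁ : l₁.Pairwise (fun a b => b ≤ a)) (h₂ : l₂.Pairwise (fun a b => b ≤ a)) : l₁ = l₂ := by
  exact hp.eq_of_pairwise (fun a b _ _ h h' => le_antisymm h' h) h₁ h₂

lemma pvZipFlat (g : List (List Int)) : ∀ (L : List Int),
    (g.zip L).flatMap (fun p => (PySem.List.sorted p.1 (fun x => x) true).take p.2.toNat)
      = (List.range g.length).flatMap
          (fun (i : Nat) => (PySem.List.sorted (g.getD i []) (fun x => x) true).take ((L.getD i 0).toNat)) := by
  induction g with
  | nil => intro L; simp
  | cons r rs ih =>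
    intro L
    cases L with
    | nil =>
      simp only [List.zip_nil_right, List.flatMap_nil, List.length_cons]
      rw [List.range_succ_eq_map, List.flatMap_cons, List.flatMap_map]
      simp
    | cons l ls =>
      simp only [List.zip_cons_cons, List.flatMap_cons, List.length_cons]
      rw [List.range_succ_eq_map, List.flatMap_cons, List.flatMap_map]
      simp only [List.getD_cons_zero, List.getD_cons_succ]
      rw [ih ls]

lemma pvMain (grid : List (List Int)) (limits : List Int) (k : Int) (hk : 0 ≤ k) :
    maxSum1 grid limits k = maxSum1_alt grid limits k := by
  simp only [maxSum1, maxSum1_alt]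
  set n := grid.length with hn
  set dic := (PySem.List.enumerate grid).flatMap (fun p => p.2.map (fun x => (p.1, x))) with hdicdef
  set S := PySem.List.sorted dic (fun q => q.2) true with hSdef
  -- bounds on first components
  have hdic : ∀ p ∈ dic, 0 ≤ p.1 ∧ p.1 < (n : Int) := by
    intro p hp
    have := pvDic_fst grid 0 p hp
    omega
  have hS : ∀ p ∈ S, 0 ≤ p.1 ∧ p.1 < (n : Int) := by
    intro p hp
    exact hdic p ((PySem.List.mem_sorted _ _ _ _).1 hp)
  have hF : ∀ p ∈ pvF S limits, 0 ≤ p.1 ∧ p.1 < (n : Int) := by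
    intro p hp
    exact hS p ((pvF_sublist S limits).mem hp)
  -- rewrite A's side
  rw [pvLoopA_eq S limits k 0 hk, zero_add]
  -- rewrite B's fold into a flatMap
  have hfun : (fun (acc : List Int) (p : List Int × Int) =>
      if p.2 > 0 then acc ++ PySem.List.slice (PySem.List.sorted p.1 (fun x => x) true) none (some p.2)
      else acc)
      = fun acc p => acc ++ (PySem.List.sorted p.1 (fun x => x) true).take p.2.toNat := by
    funext acc p
    by_cases hp : p.2 > 0
    · rw [if_pos hp, PySem.List.slice_to _ (le_of_lt hp)]
    · rw [if_neg hp]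
      have : p.2.toNat = 0 := by omega
      rw [this, List.take_zero, List.append_nil]
  rw [hfun, PySem.List.foldl_append_eq_flatMap, List.nil_append,
      PySem.List.slice_to _ hk, pvZipFlat grid limits]
  -- per-row characterisation of S
  have hSrow : ∀ i : Nat, i < n →
      (S.filter (fun p => p.1 = (i : Int))).map (·.2)
        = PySem.List.sorted (grid.getD i []) (fun x => x) true := by
    intro i hi
    apply pvEqOfPermDesc
    · have hperm : (S.filter (fun p => p.1 = (i : Int))).Perm (dic.filter (fun p => p.1 = (i : Int))) :=
        List.Perm.filter (fun p => decide (p.1 = (i : Int))) (PySem.List.sorted_perm dic (fun q : Int × Int => q.2) true)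
      have hfil : dic.filter (fun p => p.1 = (i : Int)) = (grid.getD i []).map (fun x => ((i : Int), x)) := by
        have := pvFilterDic grid 0 (i : Int) (by positivity)
        simpa using this
      refine ((hperm.map (·.2)).trans ?_).trans (PySem.List.sorted_perm (grid.getD i []) (fun x : Int => x) true).symm
      rw [hfil]
      simp
    · have hpair : S.Pairwise (fun a b => b.2 ≤ a.2) := PySem.List.sorted_pairwise_rev dic (fun q => q.2)
      exact (List.pairwise_map).2 (hpair.filter _)
    · exact PySem.List.sorted_pairwise_rev _ _
  -- the selected values, as a permutation of B's candidate pool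
  have hbounds : ∀ p ∈ S, 0 ≤ p.1 := fun p hp => (hS p hp).1
  have hP1 : (pvF S limits).Perm ((List.range n).flatMap (fun (i : Nat) => (pvF S limits).filter (fun p => p.1 = (i : Int)))) :=
    pvPartition n _ hF
  have hP2 : ((pvF S limits).map (·.2)).Perm
      ((List.range n).flatMap (fun (i : Nat) => ((pvF S limits).filter (fun p => p.1 = (i : Int))).map (·.2))) := by
    have := hP1.map (·.2)
    rwa [List.map_flatMap] at this
  have hchunks : ∀ i ∈ List.range n,
      ((pvF S limits).filter (fun p => p.1 = (i : Int))).map (·.2)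
        = (PySem.List.sorted (grid.getD i []) (fun x => x) true).take ((limits.getD i 0).toNat) := by
    intro i hi
    rw [List.mem_range] at hi
    rw [pvF_filter i S limits hbounds, hSrow i hi]
  have hP3 : ((pvF S limits).map (·.2)).Perm
      ((List.range n).flatMap (fun (i : Nat) => (PySem.List.sorted (grid.getD i []) (fun x => x) true).take ((limits.getD i 0).toNat))) := by
    refine hP2.trans ?_
    have : ((List.range n).flatMap (fun (i : Nat) => ((pvF S limits).filter (fun p => p.1 = (i : Int))).map (·.2)))
        = ((List.range n).flatMap (fun (i : Nat) => (PySem.List.sorted (grid.getD i []) (fun x => x) true).take ((limits.getD i 0).toNat))) := by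
      unfold List.flatMap
      congr 1
      exact List.map_congr_left hchunks
    rw [this]
  -- both sides are the same descending list
  have hfinal : ((pvF S limits).map (·.2))
      = PySem.List.sorted ((List.range n).flatMap (fun (i : Nat) => (PySem.List.sorted (grid.getD i []) (fun x => x) true).take ((limits.getD i 0).toNat))) (fun x => x) true := by
    apply pvEqOfPermDesc
    · exact hP3.trans (PySem.List.sorted_perm _ (fun x : Int => x) true).symm
    · have hpair : S.Pairwise (fun a b => b.2 ≤ a.2) := PySem.List.sorted_pairwise_rev dic (fun q => q.2)
      exact (List.pairwise_map).2 (hpair.sublist (pvF_sublist S limits))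
    · exact PySem.List.sorted_pairwise_rev _ _
  rw [hfinal]

-- ===== VERDICT (by name: the statement is the Claim_ definition above) =====
theorem maxSum1_spec : Claim_equal_maxSum1 := by
  intro grid limits k _ hpre
  exact pvMain grid limits k hpre.1
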